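-- pv_equiv track=rewrite | github.com/daphnefelt/Copperbottoms | ros_ws/src/SLAM/SLAM_launch.py | _is_any_running
-- ===== SOURCE A (Python) =====
-- def _is_any_running(running_names: set[str], aliases: tuple[str, ...]) -> bool:
-- 	for alias in aliases:
-- 		if alias in running_names:
-- 			return True
-- 		if alias.startswith('/') and alias[1:] in running_names:
-- 			return True
-- 		if (not alias.startswith('/')) and ('/' + alias) in running_names:
-- 			return True
-- 	return False
-- ===== SOURCE B (Python) =====
-- def _is_any_running(running_names: set[str], aliases: tuple[str, ...]) -> bool:
-- 	# Build the full candidate set (each alias plus its single-slash-toggled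
-- 	# variant) once, then one disjointness test against the running set.
-- 	candidates = set()
-- 	for alias in aliases:
-- 		candidates.add(alias)
-- 		candidates.add(alias[1:] if alias.startswith('/') else '/' + alias)
-- 	return not candidates.isdisjoint(running_names)
-- ===== Notes on version B (the rewrite author's own statement) =====
-- stated objective: idiomatic
-- what changed: Replaces the per-alias three-branch early-return membership scan with a single precomputed candidate set (each alias and its slash-toggled variant) followed by one set-disjointness test.
import Mathlib
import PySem

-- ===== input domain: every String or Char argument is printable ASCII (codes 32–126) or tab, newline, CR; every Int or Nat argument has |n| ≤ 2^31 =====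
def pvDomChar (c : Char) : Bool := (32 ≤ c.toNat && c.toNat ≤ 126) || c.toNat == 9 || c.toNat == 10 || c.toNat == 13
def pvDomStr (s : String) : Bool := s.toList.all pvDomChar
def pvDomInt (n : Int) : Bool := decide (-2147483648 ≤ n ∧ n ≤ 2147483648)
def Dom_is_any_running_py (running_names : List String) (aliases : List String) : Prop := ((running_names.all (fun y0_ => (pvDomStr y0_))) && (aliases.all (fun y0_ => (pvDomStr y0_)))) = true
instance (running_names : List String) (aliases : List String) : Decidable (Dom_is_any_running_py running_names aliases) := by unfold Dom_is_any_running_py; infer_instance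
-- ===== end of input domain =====

-- B builds the candidate set (each al plus its slash-toggled variant) once and
-- does one set-disjointness test instead of A's per-al three-branch scan; same cost, more idiomatic.

-- ===== PORT A =====
-- the 'for al in aliases' loop with its three early-return branches
def isAnyRunningLoopA (running_names : List String) : List String → Bool
  | [] => false
  | al :: rest =>
    if running_names.contains al then true
    else if PySem.Str.startswith al "/" && running_names.contains (PySem.Str.slice al (some 1) none) then true
    else if !(PySem.Str.startswith al "/") && running_names.contains (String.ofList ('/' :: al.toList)) then true
    else isAnyRunningLoopA running_names rest

def is_any_running_py (running_names : List String) (aliases : List String) : Bool :=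
  isAnyRunningLoopA running_names aliases

-- ===== PORT B =====
-- al[1:] if al.startswith('/') else '/' + al
def pvToggled (al : String) : String :=
  if PySem.Str.startswith al "/" then PySem.Str.slice al (some 1) none
  else String.ofList ('/' :: al.toList)

def is_any_running_py_alt (running_names : List String) (aliases : List String) : Bool :=
  let candidates : PySem.Set String :=
    aliases.foldl (fun s al => PySem.Set.add (PySem.Set.add s al) (pvToggled al)) PySem.Set.empty
  !(PySem.Set.isdisjoint candidates running_names)

-- ===== PRECONDITION & SPEC =====
def Spec_is_any_running_py (running_names : List String) (aliases : List String) (out : Bool) : Prop := out = is_any_running_py_alt running_names aliases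
instance (running_names : List String) (aliases : List String) (out : Bool) : Decidable (Spec_is_any_running_py running_names aliases out) := by unfold Spec_is_any_running_py; infer_instance

-- ===== CLAIM (what is proved, stated in full; the proofs are below) =====
def Claim_equal_is_any_running_py : Prop := ∀ (running_names : List String) (aliases : List String), Dom_is_any_running_py running_names aliases → Spec_is_any_running_py running_names aliases (is_any_running_py running_names aliases)

-- ===== LEMMAS AND PROOFS =====

-- membership in B's candidate set
theorem mem_candidates (aliases : List String) (s0 : PySem.Set String) (x : String) :
    x ∈ aliases.foldl (fun s al => PySem.Set.add (PySem.Set.add s al) (pvToggled al)) s0 ↔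
      x ∈ s0 ∨ ∃ a ∈ aliases, x = a ∨ x = pvToggled a := by
  induction aliases generalizing s0 with
  | nil => simp
  | cons a t ih =>
    simp only [List.foldl_cons, ih, PySem.Set.mem_add, List.mem_cons]
    constructor
    · rintro (((h | h) | h) | ⟨b, hb, h⟩)
      · exact Or.inl h
      · exact Or.inr ⟨a, Or.inl rfl, Or.inl h⟩
      · exact Or.inr ⟨a, Or.inl rfl, Or.inr h⟩
      · exact Or.inr ⟨b, Or.inr hb, h⟩
    · rintro (h | ⟨b, (rfl | hb), h⟩)
      · exact Or.inl (Or.inl (Or.inl h))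
      · rcases h with h | h
        · exact Or.inl (Or.inl (Or.inr h))
        · exact Or.inl (Or.inr h)
      · exact Or.inr ⟨b, hb, h⟩

-- A's loop one unfolding, with the three branches collapsed by case analysis on startswith
theorem loopA_cons (R : List String) (a : String) (t : List String) :
    isAnyRunningLoopA R (a :: t) = ((R.contains a || R.contains (pvToggled a)) || isAnyRunningLoopA R t) := by
  simp only [isAnyRunningLoopA, pvToggled]
  cases hsw : PySem.Str.startswith a "/" <;> cases h1 : R.contains a <;> simp

-- A's loop returns true iff some alias or its slash-toggled variant is in the running set
theorem loopA_eq_true_iff (running_names : List String) (aliases : List String) :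
    isAnyRunningLoopA running_names aliases = true ↔
      ∃ a ∈ aliases, a ∈ running_names ∨ pvToggled a ∈ running_names := by
  induction aliases with
  | nil => simp [isAnyRunningLoopA]
  | cons a t ih =>
    rw [loopA_cons]
    simp only [Bool.or_eq_true, ih, List.contains_iff_mem, List.mem_cons]
    constructor
    · rintro ((h | h) | ⟨b, hb, h⟩)
      · exact ⟨a, Or.inl rfl, Or.inl h⟩
      · exact ⟨a, Or.inl rfl, Or.inr h⟩
      · exact ⟨b, Or.inr hb, h⟩
    · rintro ⟨b, (rfl | hb), h⟩
      · rcases h with h | h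
        · exact Or.inl (Or.inl h)
        · exact Or.inl (Or.inr h)
      · exact Or.inr ⟨b, hb, h⟩

-- ===== VERDICT (by name: the statement is the Claim_ definition above) =====
theorem is_any_running_py_spec : Claim_equal_is_any_running_py := by
  intro running_names aliases _
  unfold Spec_is_any_running_py is_any_running_py is_any_running_py_alt
  rcases h : isAnyRunningLoopA running_names aliases with _ | _
  · -- A = false: no candidate is in the running set, so the sets are disjoint
    have hno : ∀ a ∈ aliases, a ∉ running_names ∧ pvToggled a ∉ running_names := by
      intro a ha
      have := (loopA_eq_true_iff running_names aliases).not.mp (by simp [h])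
      push Not at this
      have h2 := this a ha
      tauto
    symm
    simp only [Bool.not_eq_false']
    rw [PySem.Set.isdisjoint_iff]
    intro x hx
    rcases (mem_candidates aliases PySem.Set.empty x).mp hx with h0 | ⟨b, hb, rfl | rfl⟩
    · simp [PySem.Set.empty] at h0
    · exact (hno _ hb).1
    · exact (hno _ hb).2
  · -- A = true: some candidate is in the running set
    obtain ⟨a, ha, hc⟩ := (loopA_eq_true_iff running_names aliases).mp h
    symm
    simp only [Bool.not_eq_true']
    rw [← Bool.not_eq_true, PySem.Set.isdisjoint_iff]
    push Not
    rcases hc with hc | hc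
    · exact ⟨a, (mem_candidates aliases PySem.Set.empty a).mpr (Or.inr ⟨a, ha, Or.inl rfl⟩), hc⟩
    · exact ⟨pvToggled a, (mem_candidates aliases PySem.Set.empty _).mpr (Or.inr ⟨a, ha, Or.inr rfl⟩), hc⟩
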